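-- pv_equiv track=rewrite | github.com/chowonje/knowledge-hub | knowledge_hub/interfaces/cli/commands/os_cmd.py | _source_types_from_refs
-- ===== SOURCE A (Python) =====
-- from typing import Any
--
-- def _source_types_from_refs(refs: list[dict[str, Any]]) -> list[str]:
--     return sorted(
--         {
--             str(ref.get("sourceType") or "").strip()
--             for ref in refs
--             if isinstance(ref, dict) and str(ref.get("sourceType") or "").strip()
--         }
--     )
-- ===== SOURCE B (Python) =====
-- def _source_types_from_refs(refs: list) -> list:
--     # Online insertion: keep `out` sorted and duplicate-free at all times by
--     # inserting each qualifying value at its ordered position; no sort call, no set.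
--     out = []
--     for ref in refs:
--         if isinstance(ref, dict):
--             v = str(ref.get("sourceType") or "").strip()
--             if not v:
--                 continue
--             i = 0
--             while i < len(out) and out[i] < v:
--                 i += 1
--             if i == len(out) or out[i] != v:
--                 out.insert(i, v)
--     return out
-- ===== Notes on version B (the rewrite author's own statement) =====
-- stated objective: alternative
-- what changed: Replaces A's set-comprehension-then-sorted pipeline with an online algorithm that never sorts: it maintains a sorted, duplicate-free accumulator and inserts each qualifying stripped value at its ordered position as the refs are scanned.
import Mathlib
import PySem

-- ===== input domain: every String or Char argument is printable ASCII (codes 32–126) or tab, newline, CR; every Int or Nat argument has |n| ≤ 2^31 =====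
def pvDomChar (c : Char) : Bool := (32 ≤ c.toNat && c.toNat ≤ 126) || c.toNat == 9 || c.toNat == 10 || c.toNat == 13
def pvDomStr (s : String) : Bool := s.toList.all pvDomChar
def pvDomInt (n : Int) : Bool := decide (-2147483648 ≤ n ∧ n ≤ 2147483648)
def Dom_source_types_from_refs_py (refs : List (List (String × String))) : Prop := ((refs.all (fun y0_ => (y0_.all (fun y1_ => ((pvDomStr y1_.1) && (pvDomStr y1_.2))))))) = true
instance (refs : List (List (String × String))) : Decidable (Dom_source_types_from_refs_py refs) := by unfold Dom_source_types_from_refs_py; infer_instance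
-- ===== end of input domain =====

-- B never sorts: it keeps a sorted, duplicate-free accumulator and inserts each qualifying
-- stripped value at its ordered position online, instead of A's set-then-sorted pipeline.


-- ===== PORT A =====
-- set comprehension {str(ref.get("sourceType") or "").strip() for ref in refs if …}, then sorted(…)
-- (values here are strings, so `str(x or "")` is x when present and non-empty, else "";
--  isinstance(ref, dict) is always true under the type convention)
def source_types_from_refs_py (refs : List (List (String × String))) : List String :=
  PySem.List.sorted
    (PySem.Set.ofList
      ((refs.filter (fun ref => PySem.Str.strip (PySem.Dict.getD (PySem.Dict.mk ref) "sourceType" "") ≠ "")).map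
        (fun ref => PySem.Str.strip (PySem.Dict.getD (PySem.Dict.mk ref) "sourceType" ""))))
    (fun x => x) false

-- ===== PORT B =====
-- B's while-loop scan + list.insert: walk past the elements < v; at the stop point insert v
-- unless it is already there (exact transcription of the index scan as a structural walk)
def pvInsUnique (v : String) : List String → List String
  | [] => [v]
  | x :: t => if x < v then x :: pvInsUnique v t
              else if x ≠ v then v :: x :: t
              else x :: t

def pvStep (out : List String) (ref : List (String × String)) : List String :=
  let v := PySem.Str.strip (PySem.Dict.getD (PySem.Dict.mk ref) "sourceType" "")
  if v ≠ "" then pvInsUnique v out else out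

def source_types_from_refs_py_alt (refs : List (List (String × String))) : List String :=
  refs.foldl pvStep []

-- ===== PRECONDITION & SPEC =====
def Spec_source_types_from_refs_py (refs : List (List (String × String))) (out : List String) : Prop := out = source_types_from_refs_py_alt refs
instance (refs : List (List (String × String))) (out : List String) : Decidable (Spec_source_types_from_refs_py refs out) := by unfold Spec_source_types_from_refs_py; infer_instance

-- ===== CLAIM (what is proved, stated in full; the proofs are below) =====
def Claim_equal_source_types_from_refs_py : Prop := ∀ (refs : List (List (String × String))), Dom_source_types_from_refs_py refs → Spec_source_types_from_refs_py refs (source_types_from_refs_py refs)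

-- ===== LEMMAS AND PROOFS =====

theorem pv_insUnique_spec (v : String) (l : List String) (hp : l.Pairwise (· < ·)) :
    (pvInsUnique v l).Pairwise (· < ·) ∧ (∀ x, x ∈ pvInsUnique v l ↔ x = v ∨ x ∈ l) := by
  induction l with
  | nil => simp [pvInsUnique]
  | cons x t ih =>
    have hxt : ∀ y ∈ t, x < y := fun y hy => (List.pairwise_cons.mp hp).1 y hy
    have hpt : t.Pairwise (· < ·) := (List.pairwise_cons.mp hp).2
    by_cases h1 : x < v
    · have h := ih hpt
      rw [show pvInsUnique v (x :: t) = x :: pvInsUnique v t from by simp [pvInsUnique, h1]]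
      refine ⟨List.pairwise_cons.mpr ⟨fun y hy => ?_, h.1⟩, fun z => ?_⟩
      · rcases (h.2 y).mp hy with rfl | hy'
        · exact h1
        · exact hxt y hy'
      · simp only [List.mem_cons, h.2 z]; tauto
    · by_cases h2 : x = v
      · rw [show pvInsUnique v (x :: t) = x :: t from by simp [pvInsUnique, h1, h2]]
        refine ⟨hp, fun z => ?_⟩
        subst h2; simp only [List.mem_cons]; tauto
      · have hvx : v < x := lt_of_le_of_ne (not_lt.mp h1) (fun e => h2 e.symm)
        rw [show pvInsUnique v (x :: t) = v :: x :: t from by simp [pvInsUnique, h1, h2]]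
        refine ⟨List.pairwise_cons.mpr ⟨fun y hy => ?_, hp⟩, fun z => by simp⟩
        rcases List.mem_cons.mp hy with rfl | hy'
        · exact hvx
        · exact lt_trans hvx (hxt y hy')

theorem pv_fold_spec (refs : List (List (String × String))) (acc : List String)
    (hp : acc.Pairwise (· < ·)) :
    (refs.foldl pvStep acc).Pairwise (· < ·) ∧
    (∀ x, x ∈ refs.foldl pvStep acc ↔
      x ∈ acc ∨ x ∈ (refs.filter (fun ref => PySem.Str.strip (PySem.Dict.getD (PySem.Dict.mk ref) "sourceType" "") ≠ "")).map
        (fun ref => PySem.Str.strip (PySem.Dict.getD (PySem.Dict.mk ref) "sourceType" ""))) := by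
  induction refs generalizing acc with
  | nil => exact ⟨hp, fun x => by simp⟩
  | cons r t ih =>
    rw [List.foldl_cons, List.filter_cons]
    by_cases h : PySem.Str.strip (PySem.Dict.getD (PySem.Dict.mk r) "sourceType" "") = ""
    · rw [show pvStep acc r = acc from by simp [pvStep, h]]
      have hr := ih acc hp
      refine ⟨hr.1, fun x => ?_⟩
      rw [hr.2 x]
      simp [h]
    · rw [show pvStep acc r = pvInsUnique (PySem.Str.strip (PySem.Dict.getD (PySem.Dict.mk r) "sourceType" "")) acc from by simp [pvStep, h]]
      have hins := pv_insUnique_spec (PySem.Str.strip (PySem.Dict.getD (PySem.Dict.mk r) "sourceType" "")) acc hp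
      have hr := ih _ hins.1
      refine ⟨hr.1, fun x => ?_⟩
      rw [hr.2 x, hins.2 x,
        if_pos (show (decide (PySem.Str.strip (PySem.Dict.getD (PySem.Dict.mk r) "sourceType" "") ≠ "")) = true from by simp [h])]
      simp only [List.map_cons, List.mem_cons]
      constructor
      · rintro ((h' | h') | h')
        · exact Or.inr (Or.inl h')
        · exact Or.inl h'
        · exact Or.inr (Or.inr h')
      · rintro (h' | h' | h')
        · exact Or.inl (Or.inr h')
        · exact Or.inl (Or.inl h')
        · exact Or.inr h' 

-- ===== VERDICT (by name: the statement is the Claim_ definition above) =====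
theorem source_types_from_refs_py_spec : Claim_equal_source_types_from_refs_py := by
  intro refs _
  unfold Spec_source_types_from_refs_py source_types_from_refs_py source_types_from_refs_py_alt
  have h := pv_fold_spec refs [] (by simp)
  set xs := ((refs.filter (fun ref => PySem.Str.strip (PySem.Dict.getD (PySem.Dict.mk ref) "sourceType" "") ≠ "")).map
      (fun ref => PySem.Str.strip (PySem.Dict.getD (PySem.Dict.mk ref) "sourceType" ""))) with hxs
  set ys := refs.foldl pvStep [] with hys
  have hperm : ys.Perm (PySem.Set.ofList xs) := by
    rw [List.perm_ext_iff_of_nodup (h.1.imp (fun {a b} hab => ne_of_lt hab)) (PySem.Set.nodup_ofList xs)]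
    intro x
    rw [PySem.Set.mem_ofList]
    simpa using h.2 x
  exact PySem.List.sorted_eq_of_perm_of_pairwise_lt _ _ _ hperm h.1
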